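-- pv_equiv track=rewrite | github.com/eliottcassidy2000/math | 04-computation/blackself8_deep.py | count_automorphisms
-- ===== SOURCE A (Python) =====
-- def count_automorphisms(T, n):
--     scores = [sum(T[i][j] for j in range(n) if j != i) for i in range(n)]
--     sg = {}
--     for v, s in enumerate(scores):
--         sg.setdefault(s, []).append(v)
--     possible = [sg[scores[v]] for v in range(n)]
--     count = [0]
--     auts = []
--
--     def bt(v, perm, used):
--         if v == n:
--             count[0] += 1
--             auts.append(tuple(perm))
--             return
--         for t in possible[v]:
--             if t in used:
--                 continue
--             perm[v] = t
--             ok = all(T[v][u] == T[t][perm[u]] and T[u][v] == T[perm[u]][t] for u in range(v))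
--             if ok:
--                 used.add(t)
--                 bt(v + 1, perm, used)
--                 used.remove(t)
--             perm[v] = -1
--
--     bt(0, [-1]*n, set())
--     return count[0], auts
-- ===== SOURCE B (Python) =====
-- def count_automorphisms(T, n):
--     scores = [sum(T[i][j] for j in range(n) if j != i) for i in range(n)]
--     possible = [[u for u in range(n) if scores[u] == scores[v]] for v in range(n)]
--     perms = [[]]
--     for v in range(n):
--         perms = [p + [t] for p in perms
--                  for t in possible[v]
--                  if t not in p and all(T[v][u] == T[t][p[u]] and T[u][v] == T[p[u]][t]
--                                        for u in range(v))]
--     return len(perms), [tuple(p) for p in perms]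
-- ===== Notes on version B (the rewrite author's own statement) =====
-- stated objective: simpler
-- what changed: A's recursive backtracking with a mutable perm array, a used set and nonlocal count/auts accumulators, plus a score-group dict, is replaced by a non-mutating level-by-level expansion: a single loop that extends every valid partial permutation by each compatible candidate, with candidate groups read off directly by a comprehension over equal scores (no dict, no recursion, no undo bookkeeping).
-- outside the precondition, e.g. on count_automorphisms([], 1): A returns (1, [(0,)]), B returns (1, [(0,)]); on count_automorphisms([[0]], -1): A raises IndexError, B returns (1, [()])
import Mathlib
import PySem

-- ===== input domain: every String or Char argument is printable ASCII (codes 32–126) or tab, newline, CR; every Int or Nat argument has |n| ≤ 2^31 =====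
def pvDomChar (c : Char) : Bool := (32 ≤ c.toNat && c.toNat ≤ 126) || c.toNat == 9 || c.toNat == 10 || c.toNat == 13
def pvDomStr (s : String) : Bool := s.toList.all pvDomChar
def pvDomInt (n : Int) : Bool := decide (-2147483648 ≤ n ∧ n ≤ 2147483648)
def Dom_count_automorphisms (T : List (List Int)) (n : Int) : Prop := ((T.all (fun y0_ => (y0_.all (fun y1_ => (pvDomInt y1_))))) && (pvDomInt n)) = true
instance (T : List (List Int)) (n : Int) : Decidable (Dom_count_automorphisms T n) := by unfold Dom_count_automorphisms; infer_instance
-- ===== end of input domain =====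

-- B replaces A's recursive backtracking (mutable perm/used/count) and score-group dict by a
-- non-mutating level-by-level expansion of partial permutations (objective: simpler).

-- ===== PORT A =====
-- T[i][j] (total form; Pre_ keeps all indices in range where Python would raise)
def pvIdx (T : List (List Int)) (i j : Int) : Int :=
  PySem.List.pyGetD (PySem.List.pyGetD T i []) j 0

-- scores = [sum(T[i][j] for j in range(n) if j != i) for i in range(n)]  (same line in A and in B)
def pvScores (T : List (List Int)) (n : Int) : List Int :=
  (PySem.List.pyRange 0 n 1).map (fun i =>
    ((PySem.List.pyRange 0 n 1).filter (fun j => j != i)).foldl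
      (fun acc j => acc + pvIdx T i j) 0)

-- ok = all(T[v][u] == T[t][p[u]] and T[u][v] == T[p[u]][t] for u in range(v))
-- (the identical expression appears in A, with p = the mutated perm array, and in B, with p the prefix)
def pvOk (T : List (List Int)) (v : Int) (p : List Int) (t : Int) : Bool :=
  (PySem.List.pyRange 0 v 1).all (fun u =>
    pvIdx T v u == pvIdx T t (PySem.List.pyGetD p u 0) &&
    pvIdx T u v == pvIdx T (PySem.List.pyGetD p u 0) t)

-- the nested function bt; Python mutation of count/auts is threaded as the accumulator pair,
-- perm/used are passed per call (bt restores them on exit).  fuel = n - v counts the remaining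
-- levels; it is exactly the recursion depth of the Python call tree (fuel 0 with v ≠ n unreachable).
def btA (T : List (List Int)) (possible : List (List Int)) (n : Int) :
    Nat → Int → List Int → PySem.Set Int → Int × List (List Int) → Int × List (List Int)
  | fuel, v, perm, used, acc =>
    if v = n then (acc.1 + 1, acc.2 ++ [perm])
    else
      match fuel with
      | 0 => acc
      | f + 1 =>
        (PySem.List.pyGetD possible v []).foldl
          (fun st t =>
            if PySem.Set.contains used t then st
            else
              let perm' := PySem.List.pySetD perm v t
              if pvOk T v perm' t then btA T possible n f (v + 1) perm' (PySem.Set.add used t) st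
              else st)
          acc

def count_automorphisms (T : List (List Int)) (n : Int) : Int × List (List Int) :=
  let scores := pvScores T n
  let sg := (PySem.List.enumerate scores 0).foldl
    (fun d vs => PySem.Dict.modify d vs.2 [] (fun l => l ++ [vs.1])) PySem.Dict.empty
  let possible := (PySem.List.pyRange 0 n 1).map
    (fun v => PySem.Dict.getD sg (PySem.List.pyGetD scores v 0) [])
  btA T possible n n.toNat 0 (List.replicate n.toNat (-1)) PySem.Set.empty (0, [])

-- ===== PORT B =====
def count_automorphisms_alt (T : List (List Int)) (n : Int) : Int × List (List Int) :=
  let scores := pvScores T n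
  let possible := (PySem.List.pyRange 0 n 1).map (fun v =>
    (PySem.List.pyRange 0 n 1).filter (fun u =>
      PySem.List.pyGetD scores u 0 == PySem.List.pyGetD scores v 0))
  let perms := (PySem.List.pyRange 0 n 1).foldl
    (fun ps v => ps.flatMap (fun p =>
      ((PySem.List.pyGetD possible v []).filter
          (fun t => !(p.contains t) && pvOk T v p t)).map (fun t => p ++ [t])))
    [[]]
  ((perms.length : Int), perms)

-- ===== PRECONDITION & SPEC =====
-- A raises IndexError outside these bounds (n < 0, n > len(T), or a row shorter than n); Pre_ also
-- excludes a few degenerate inputs (e.g. n = 1 with a too-short T) where the out-of-range index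
-- happens never to be evaluated and A still returns — B returns the same value on those.
def Pre_count_automorphisms (T : List (List Int)) (n : Int) : Prop :=
  0 ≤ n ∧ n ≤ (T.length : Int) ∧ ∀ row ∈ T.take n.toNat, n ≤ (row.length : Int)
instance (T : List (List Int)) (n : Int) : Decidable (Pre_count_automorphisms T n) := by
  unfold Pre_count_automorphisms; infer_instance
def pvWitness_count_automorphisms : List (List Int) × Int := ([[0, 1], [1, 0]], 2)

def Spec_count_automorphisms (T : List (List Int)) (n : Int) (out : Int × List (List Int)) : Prop := out = count_automorphisms_alt T n
instance (T : List (List Int)) (n : Int) (out : Int × List (List Int)) : Decidable (Spec_count_automorphisms T n out) := by unfold Spec_count_automorphisms; infer_instance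

-- ===== CLAIM (what is proved, stated in full; the proofs are below) =====
def Claim_equal_count_automorphisms : Prop := ∀ (T : List (List Int)) (n : Int), Dom_count_automorphisms T n → Pre_count_automorphisms T n → Spec_count_automorphisms T n (count_automorphisms T n)

-- ===== LEMMAS AND PROOFS =====

-- the completions of a partial permutation p (|p| = v levels fixed, f levels to go)
def extB (T : List (List Int)) (possible : List (List Int)) : Nat → Int → List Int → List (List Int)
  | 0, _, p => [p]
  | f + 1, v, p =>
    ((PySem.List.pyGetD possible v []).filter (fun t => !(p.contains t) && pvOk T v p t)).flatMap
      (fun t => extB T possible f (v + 1) (p ++ [t]))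

theorem pv_all_congr {α : Type} (l : List α) (f g : α → Bool)
    (h : ∀ x ∈ l, f x = g x) : l.all f = l.all g := by
  induction l with
  | nil => rfl
  | cons a l ih =>
    simp only [List.all_cons]
    rw [h a (by simp), ih (fun x hx => h x (by simp [hx]))]

theorem sg_getD (scores : List Int) (s : Int) :
    PySem.Dict.getD ((PySem.List.enumerate scores 0).foldl
        (fun d vs => PySem.Dict.modify d vs.2 [] (fun l => l ++ [vs.1])) PySem.Dict.empty) s []
      = ((PySem.List.enumerate scores 0).filter (fun vs => vs.2 == s)).map (·.1) := by
  have h := List.foldl_map (f := fun (vs : Int × Int) => (vs.2, vs.1))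
    (g := fun (d : PySem.Dict Int (List Int)) (p : Int × Int) => PySem.Dict.modify d p.1 [] (fun l => l ++ [p.2]))
    (l := PySem.List.enumerate scores 0) (init := PySem.Dict.empty)
  simp only at h
  rw [← h, PySem.Dict.getD_foldl_modify_append]
  simp [List.filter_map, Function.comp_def]

theorem possible_eq (T : List (List Int)) (n : Int) (hn : 0 ≤ n) :
    ((PySem.List.pyRange 0 n 1).map
      (fun v => PySem.Dict.getD ((PySem.List.enumerate (pvScores T n) 0).foldl
        (fun d vs => PySem.Dict.modify d vs.2 [] (fun l => l ++ [vs.1])) PySem.Dict.empty)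
        (PySem.List.pyGetD (pvScores T n) v 0) []))
    = (PySem.List.pyRange 0 n 1).map (fun v =>
        (PySem.List.pyRange 0 n 1).filter (fun u =>
          PySem.List.pyGetD (pvScores T n) u 0 == PySem.List.pyGetD (pvScores T n) v 0)) := by
  have hlen : ((pvScores T n).length : Int) = n := by
    simp [pvScores, PySem.List.length_pyRange_one]
    omega
  apply List.map_congr_left
  intro v _
  rw [sg_getD]
  rw [PySem.List.enumerate_eq_map_pyRange (d := 0)]
  rw [List.filter_map, List.map_map]
  simp only [Function.comp_def]
  rw [List.map_id']
  have h2 : PySem.List.len (pvScores T n) = n := by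
    simp [PySem.List.len, hlen]
  rw [h2]

theorem pvOk_set (T : List (List Int)) (p pad : List Int) (t : Int) :
    pvOk T (p.length : Int) (PySem.List.pySetD (p ++ pad) (p.length : Int) t) t
      = pvOk T (p.length : Int) p t := by
  unfold pvOk
  apply pv_all_congr
  intro u hu
  rw [PySem.List.mem_pyRange_one] at hu
  have hget : PySem.List.pyGetD (PySem.List.pySetD (p ++ pad) (p.length : Int) t) u 0
      = PySem.List.pyGetD p u 0 := by
    rw [PySem.List.pySetD_natCast]
    rw [PySem.List.pyGetD_eq_getElem _ 0 hu.1 (by simp; omega)]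
    rw [PySem.List.pyGetD_eq_getElem p 0 hu.1 (by omega)]
    rw [List.getElem_set_ne (by omega)]
    rw [List.getElem_append_left (by omega)]
  rw [hget]

theorem pv_set_append_len {α : Type} (p : List α) (x : α) (xs : List α) (t : α) :
    (p ++ x :: xs).set p.length t = p ++ t :: xs := by
  induction p with
  | nil => rfl
  | cons a p ih => simp [ih]

theorem btA_spec (T : List (List Int)) (possible : List (List Int)) (n : Int) :
    ∀ (f : Nat) (p : List Int) (used : PySem.Set Int) (c : Int) (auts : List (List Int)),
      ((p.length : Int) + f = n) →
      (∀ x : Int, PySem.Set.contains used x = p.contains x) →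
      btA T possible n f (p.length : Int) (p ++ List.replicate f (-1)) used (c, auts)
        = (c + ((extB T possible f (p.length : Int) p).length : Int),
           auts ++ extB T possible f (p.length : Int) p) := by
  intro f
  induction f with
  | zero =>
    intro p used c auts hp hused
    have hv : (p.length : Int) = n := by omega
    simp [btA, hv, extB]
  | succ f ih =>
    intro p used c auts hp hused
    have hv : ¬ ((p.length : Int) = n) := by push_cast at hp; omega
    rw [btA]
    simp only [if_neg hv]
    have key : ∀ (l : List Int) (c : Int) (auts : List (List Int)),
        l.foldl
          (fun st t =>
            if PySem.Set.contains used t then st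
            else
              let perm' := PySem.List.pySetD (p ++ List.replicate (f + 1) (-1)) (p.length : Int) t
              if pvOk T (p.length : Int) perm' t then
                btA T possible n f ((p.length : Int) + 1) perm' (PySem.Set.add used t) st
              else st)
          (c, auts)
        = (c + (((l.filter (fun t => !(p.contains t) && pvOk T (p.length : Int) p t)).flatMap
              (fun t => extB T possible f ((p.length : Int) + 1) (p ++ [t]))).length : Int),
           auts ++ (l.filter (fun t => !(p.contains t) && pvOk T (p.length : Int) p t)).flatMap
              (fun t => extB T possible f ((p.length : Int) + 1) (p ++ [t]))) := by
      intro l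
      induction l with
      | nil => intro c auts; simp
      | cons t l ihl =>
        intro c auts
        simp only [List.foldl_cons, List.filter_cons]
        cases hpc : p.contains t with
        | true =>
          have hcu : PySem.Set.contains used t = true := (hused t).trans hpc
          simp only [hcu, Bool.not_true, Bool.false_and, Bool.false_eq_true,
            if_false, if_true]
          exact ihl c auts
        | false =>
          have hcu : PySem.Set.contains used t = false := (hused t).trans hpc
          simp only [hcu, Bool.not_false, Bool.true_and, Bool.false_eq_true, if_false]
          have hperm : PySem.List.pySetD (p ++ List.replicate (f + 1) (-1)) (p.length : Int) t
              = (p ++ [t]) ++ List.replicate f (-1) := by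
            rw [PySem.List.pySetD_natCast, List.replicate_succ, pv_set_append_len]
            simp
          have hok := pvOk_set T p (List.replicate (f + 1) (-1)) t
          cases hokv : pvOk T (p.length : Int) p t with
          | false =>
            simp only [hok, hokv, Bool.false_eq_true, if_false]
            exact ihl c auts
          | true =>
            simp only [hok, hokv, if_true]
            rw [hperm]
            have hlen1 : ((p ++ [t]).length : Int) = (p.length : Int) + 1 := by
              simp
            have hused' : ∀ x : Int, PySem.Set.contains (PySem.Set.add used t) x
                = (p ++ [t]).contains x := by
              intro x
              have htnot : t ∉ used := by
                intro hmem
                rw [← PySem.Set.contains_iff used t] at hmem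
                rw [hcu] at hmem
                exact Bool.false_ne_true hmem
              rw [PySem.Set.add_of_not_mem htnot]
              have h := hused x
              simp only [PySem.Set.contains_eq_listContains] at h ⊢
              simp only [List.contains_append, h]
            have hrec := ih (p ++ [t]) (PySem.Set.add used t) c auts
              (by push_cast at hp ⊢; omega) hused'
            rw [hlen1] at hrec
            rw [hrec, ihl]
            simp [List.append_assoc, List.length_append]
            omega
    rw [key (PySem.List.pyGetD possible (p.length : Int) []) c auts]
    simp [extB]

theorem foldB_spec (T : List (List Int)) (possible : List (List Int)) (n : Int) :
    ∀ (f : Nat) (v : Int) (ps : List (List Int)), ((n - v).toNat = f) →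
      (PySem.List.pyRange v n 1).foldl
        (fun ps v => ps.flatMap (fun p =>
          ((PySem.List.pyGetD possible v []).filter
              (fun t => !(p.contains t) && pvOk T v p t)).map (fun t => p ++ [t]))) ps
        = ps.flatMap (extB T possible f v) := by
  intro f
  induction f with
  | zero =>
    intro v ps h
    rw [PySem.List.pyRange_one_eq_nil (by omega)]
    simp [extB]
  | succ f ih =>
    intro v ps h
    rw [PySem.List.pyRange_one_cons (by omega), List.foldl_cons]
    rw [ih (v + 1) _ (by omega)]
    rw [List.flatMap_assoc]
    congr 1
    funext p
    rw [List.flatMap_map]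
    rfl

-- ===== VERDICT (by name: the statement is the Claim_ definition above) =====
theorem count_automorphisms_spec : Claim_equal_count_automorphisms := by
  intro T n hdom hpre
  obtain ⟨hn, -, -⟩ := hpre
  unfold Spec_count_automorphisms count_automorphisms count_automorphisms_alt
  simp only []
  rw [possible_eq T n hn]
  have hA := btA_spec T
    ((PySem.List.pyRange 0 n 1).map (fun v =>
      (PySem.List.pyRange 0 n 1).filter (fun u =>
        PySem.List.pyGetD (pvScores T n) u 0 == PySem.List.pyGetD (pvScores T n) v 0)))
    n n.toNat [] PySem.Set.empty 0 []
    (by simp [Int.toNat_of_nonneg hn]) (fun x => rfl)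
  simp only [List.length_nil, Nat.cast_zero, List.nil_append] at hA
  have hB := foldB_spec T
    ((PySem.List.pyRange 0 n 1).map (fun v =>
      (PySem.List.pyRange 0 n 1).filter (fun u =>
        PySem.List.pyGetD (pvScores T n) u 0 == PySem.List.pyGetD (pvScores T n) v 0)))
    n n.toNat 0 [[]] (by omega)
  rw [hB]
  simp only [List.flatMap_cons, List.flatMap_nil, List.append_nil]
  rw [hA]
  simp
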